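-- pv_equiv track=rewrite | github.com/mihail-nikolov/hackBG | week0/simple_problems/20_matr_boom.py | matr_boom_plan
-- ===== SOURCE A (Python) =====
-- import copy
--
-- def matrix_boom(i, j, val,  matrix):
--     new_matrix = copy.deepcopy(matrix)
--     for row_i, row in enumerate(new_matrix):
--             if row_i == i or row_i == i - 1 or row_i == i + 1:
--                 for column_j, number in enumerate(row):
--                     if column_j == j - 1 or column_j == j + 1 or column_j == j:
--                         if column_j == j and row_i == i:
--                             row[column_j] = val
--                         else:
--                             number -= val
--                             if number < 0:
--                                 row[column_j] = 0
--                             else: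
--                                 row[column_j] -= val
--     return new_matrix
--
-- def matrix_sum(matrix):
--     result = 0
--     for row in matrix:
--         for number in row:
--             result += number
--     return result
--
-- def matr_boom_plan(matrix):
--     dic = {}
--     for row_i, row in enumerate(matrix):
--         for column_j, num in enumerate(row):
--             index = "(" + str(row_i) + "," + str(column_j) + ")"
--             boomed_matrix = matrix_boom(row_i, column_j, num, matrix)
--             result = matrix_sum(boomed_matrix)
--             dic[index] = result
--             index = ""
--     return dic
-- ===== SOURCE B (Python) =====
-- def matr_boom_plan(matrix):
--     # Compute the grand total once; each boomed sum is total plus the delta of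
--     # at most 8 in-range neighbour cells (the center cell is rewritten with its own value).
--     total = sum(sum(row) for row in matrix)
--     dic = {}
--     for i, row in enumerate(matrix):
--         for j, v in enumerate(row):
--             res = total
--             for r in (i - 1, i, i + 1):
--                 if 0 <= r < len(matrix):
--                     for c in (j - 1, j, j + 1):
--                         if (r != i or c != j) and 0 <= c < len(matrix[r]):
--                             res += (matrix[r][c] - v if matrix[r][c] - v > 0 else 0) - matrix[r][c]
--             dic["(%d,%d)" % (i, j)] = res
--     return dic
-- ===== Notes on version B (the rewrite author's own statement) =====
-- stated objective: faster
-- what changed: Instead of deep-copying the whole matrix and re-summing it for every cell, B computes the grand total once and, per cell, adjusts it by the delta of at most 8 in-range neighbour cells.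
import Mathlib
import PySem

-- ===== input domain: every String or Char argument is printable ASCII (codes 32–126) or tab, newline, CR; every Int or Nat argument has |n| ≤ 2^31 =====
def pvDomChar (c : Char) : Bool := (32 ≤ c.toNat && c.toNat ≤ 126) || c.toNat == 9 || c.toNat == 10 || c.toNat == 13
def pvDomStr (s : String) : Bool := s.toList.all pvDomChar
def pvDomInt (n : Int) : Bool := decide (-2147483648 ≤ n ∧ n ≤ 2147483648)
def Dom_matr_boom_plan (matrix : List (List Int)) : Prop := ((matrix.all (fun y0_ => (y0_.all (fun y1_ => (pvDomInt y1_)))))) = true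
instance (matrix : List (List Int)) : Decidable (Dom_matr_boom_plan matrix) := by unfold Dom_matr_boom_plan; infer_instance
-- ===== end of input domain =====

set_option maxHeartbeats 1000000


-- B replaces A's per-cell deep-copy + full re-sum by one precomputed grand total
-- adjusted per cell by the delta of at most 8 in-range neighbour cells (objective: faster).

-- ===== PORT A =====
-- inner column loop of matrix_boom, for a row with index row_i in the boomed band
def pvBoomRow (i j val row_i : Int) (row : List Int) : List Int :=
  (PySem.List.enumerate row).map (fun p =>
    if p.1 = j - 1 ∨ p.1 = j + 1 ∨ p.1 = j then
      if p.1 = j ∧ row_i = i then val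
      else if p.2 - val < 0 then 0 else p.2 - val
    else p.2)

def matrix_boom (i j val : Int) (matrix : List (List Int)) : List (List Int) :=
  (PySem.List.enumerate matrix).map (fun p =>
    if p.1 = i ∨ p.1 = i - 1 ∨ p.1 = i + 1 then pvBoomRow i j val p.1 p.2 else p.2)

def matrix_sum (matrix : List (List Int)) : Int :=
  matrix.foldl (fun result row => row.foldl (fun r n => r + n) result) 0

def matr_boom_plan (matrix : List (List Int)) : List (String × Int) :=
  ((PySem.List.enumerate matrix).foldl (fun (dic : PySem.Dict String Int) p =>
      (PySem.List.enumerate p.2).foldl (fun dic q =>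
        dic.insert ("(" ++ PySem.Int.toStr p.1 ++ "," ++ PySem.Int.toStr q.1 ++ ")")
          (matrix_sum (matrix_boom p.1 q.1 q.2 matrix))) dic)
    PySem.Dict.empty).items

-- ===== PORT B =====
-- the per-cell result: grand total adjusted by the ≤ 8 in-range neighbour deltas
def pvCellRes (matrix : List (List Int)) (total i j v : Int) : Int :=
  [i - 1, i, i + 1].foldl (fun res r =>
    if 0 ≤ r ∧ r < (matrix.length : Int) then
      [j - 1, j, j + 1].foldl (fun res c =>
        if (r ≠ i ∨ c ≠ j) ∧ 0 ≤ c ∧ c < ((matrix.getD r.toNat []).length : Int) then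
          res + ((if (matrix.getD r.toNat []).getD c.toNat 0 - v > 0 then (matrix.getD r.toNat []).getD c.toNat 0 - v else 0)
                 - (matrix.getD r.toNat []).getD c.toNat 0)
        else res) res
    else res) total

def matr_boom_plan_alt (matrix : List (List Int)) : List (String × Int) :=
  let total := (matrix.map (fun row => row.sum)).sum
  ((PySem.List.enumerate matrix).foldl (fun (dic : PySem.Dict String Int) p =>
      (PySem.List.enumerate p.2).foldl (fun dic q =>
        dic.insert ("(" ++ PySem.Int.toStr p.1 ++ "," ++ PySem.Int.toStr q.1 ++ ")")
          (pvCellRes matrix total p.1 q.1 q.2)) dic)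
    PySem.Dict.empty).items

-- ===== PRECONDITION & SPEC =====
def Spec_matr_boom_plan (matrix : List (List Int)) (out : List (String × Int)) : Prop := out = matr_boom_plan_alt matrix
instance (matrix : List (List Int)) (out : List (String × Int)) : Decidable (Spec_matr_boom_plan matrix out) := by unfold Spec_matr_boom_plan; infer_instance

-- ===== CLAIM (what is proved, stated in full; the proofs are below) =====
def Claim_equal_matr_boom_plan : Prop := ∀ (matrix : List (List Int)), Dom_matr_boom_plan matrix → Spec_matr_boom_plan matrix (matr_boom_plan matrix)

-- ===== LEMMAS AND PROOFS =====

theorem foldl_add_eq (l : List Int) (a : Int) : l.foldl (fun r n => r + n) a = a + l.sum := by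
  induction l generalizing a with
  | nil => simp
  | cons x t ih => simp [List.foldl, ih, List.sum_cons]; ring

theorem matrix_sum_foldl (m : List (List Int)) : ∀ (a : Int),
    m.foldl (fun result row => row.foldl (fun r n => r + n) result) a = a + (m.map (fun row => row.sum)).sum := by
  induction m with
  | nil => simp
  | cons r t ih =>
    intro a
    rw [List.foldl_cons, foldl_add_eq r a, ih (a + r.sum), List.map_cons, List.sum_cons]
    ring

theorem matrix_sum_eq (m : List (List Int)) : matrix_sum m = (m.map (fun row => row.sum)).sum := by
  unfold matrix_sum; rw [matrix_sum_foldl]; ring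

theorem sum_map_add {α : Type} (l : List α) (f g : α → Int) :
    (l.map (fun x => f x + g x)).sum = (l.map f).sum + (l.map g).sum := by
  induction l with
  | nil => simp
  | cons x t ih => simp [ih]; ring

-- sum over enumerate of a function that is zero except at index t
theorem sum_enum_single {α : Type} (d : α) (h : α → Int) (t : Int) :
    ∀ (row : List α) (k : Int),
    ((PySem.List.enumerate row k).map (fun p => if p.1 = t then h p.2 else 0)).sum
      = if k ≤ t ∧ t < k + (row.length : Int) then h (row.getD (t - k).toNat d) else 0 := by
  intro row
  induction row with
  | nil =>
    intro k
    simp only [PySem.List.enumerate_nil, List.map_nil, List.sum_nil, List.length_nil,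
      Nat.cast_zero, add_zero]
    rw [if_neg (by omega)]
  | cons x xs ih =>
    intro k
    rw [PySem.List.enumerate_cons]
    simp only [List.map_cons, List.sum_cons, ih (k + 1), List.length_cons]
    by_cases hk : k = t
    · subst hk
      have : ¬ (k + 1 ≤ k ∧ k < k + 1 + (xs.length : Int)) := by omega
      rw [if_pos rfl, if_neg this, if_pos (by push_cast; omega)]
      simp
    · rw [if_neg (by simpa using hk)]
      have harg : k + 1 ≤ t → (t - (k + 1)).toNat + 1 = (t - k).toNat := by omega
      by_cases hin : k + 1 ≤ t ∧ t < k + 1 + (xs.length : Int)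
      · rw [if_pos hin, if_pos (by push_cast; omega)]
        have : (x :: xs).getD (t - k).toNat d = xs.getD (t - (k + 1)).toNat d := by
          rw [← harg hin.1]; rfl
        rw [this]; ring
      · rw [if_neg hin, if_neg (by push_cast; omega)]; simp

-- the delta B adds for neighbour cell (r,c) of center (i,j) with center value v
def pvDelta (i j v r c x : Int) : Int :=
  if r = i ∧ c = j then v - x
  else (if x - v < 0 then 0 else x - v) - x

theorem boomRow_sum (i j v r : Int) (row : List Int) :
    (pvBoomRow i j v r row).sum = row.sum
      + (if 0 ≤ j - 1 ∧ j - 1 < (row.length : Int) then pvDelta i j v r (j-1) (row.getD (j-1).toNat 0) else 0)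
      + (if 0 ≤ j ∧ j < (row.length : Int) then pvDelta i j v r j (row.getD j.toNat 0) else 0)
      + (if 0 ≤ j + 1 ∧ j + 1 < (row.length : Int) then pvDelta i j v r (j+1) (row.getD (j+1).toNat 0) else 0) := by
  unfold pvBoomRow
  have hpt : ∀ p : Int × Int,
      (if p.1 = j - 1 ∨ p.1 = j + 1 ∨ p.1 = j then
        if p.1 = j ∧ r = i then v
        else if p.2 - v < 0 then 0 else p.2 - v
      else p.2)
      = p.2 + ((if p.1 = j - 1 then pvDelta i j v r (j-1) p.2 else 0)
             + ((if p.1 = j then pvDelta i j v r j p.2 else 0)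
             + (if p.1 = j + 1 then pvDelta i j v r (j+1) p.2 else 0))) := by
    rintro ⟨c, x⟩
    unfold pvDelta
    split_ifs <;> omega
  calc ((PySem.List.enumerate row).map _).sum
      = ((PySem.List.enumerate row).map (fun p => p.2
          + ((if p.1 = j - 1 then pvDelta i j v r (j-1) p.2 else 0)
           + ((if p.1 = j then pvDelta i j v r j p.2 else 0)
           + (if p.1 = j + 1 then pvDelta i j v r (j+1) p.2 else 0))))).sum := by
        exact congrArg List.sum (List.map_congr_left (fun p _ => hpt p))
    _ = _ := by
        rw [sum_map_add, sum_map_add, sum_map_add]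
        rw [show ((PySem.List.enumerate row).map (fun p => p.2)).sum = row.sum from by
          rw [show (fun p : Int × Int => p.2) = (Prod.snd : Int × Int → Int) from rfl,
            PySem.List.map_snd_enumerate]]
        rw [sum_enum_single 0 (pvDelta i j v r (j-1)) (j-1) row 0,
            sum_enum_single 0 (pvDelta i j v r j) j row 0,
            sum_enum_single 0 (pvDelta i j v r (j+1)) (j+1) row 0]
        simp only [zero_add, Int.sub_zero]
        ring

-- the total delta contributed by row r (B's inner loop body as a closed sum)
def pvRowDelta (i j v r : Int) (row : List Int) : Int :=
    (if 0 ≤ j - 1 ∧ j - 1 < (row.length : Int) then pvDelta i j v r (j-1) (row.getD (j-1).toNat 0) else 0)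
  + (if 0 ≤ j ∧ j < (row.length : Int) then pvDelta i j v r j (row.getD j.toNat 0) else 0)
  + (if 0 ≤ j + 1 ∧ j + 1 < (row.length : Int) then pvDelta i j v r (j+1) (row.getD (j+1).toNat 0) else 0)

-- picking the single matching row indicator out of the three
theorem indicator_pick (i j v : Int) (row : List Int) (r : Int)
    (h : r = i ∨ r = i - 1 ∨ r = i + 1) :
    (if r = i - 1 then pvRowDelta i j v (i - 1) row else 0)
      + ((if r = i then pvRowDelta i j v i row else 0)
      + (if r = i + 1 then pvRowDelta i j v (i + 1) row else 0))
      = pvRowDelta i j v r row := by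
  rcases h with h | h | h
  · rw [if_neg (show ¬(r = i - 1) by omega), if_pos h, if_neg (show ¬(r = i + 1) by omega), h]
    ring
  · rw [if_pos h, if_neg (show ¬(r = i) by omega), if_neg (show ¬(r = i + 1) by omega), h]
    ring
  · rw [if_neg (show ¬(r = i - 1) by omega), if_neg (show ¬(r = i) by omega), if_pos h, h]
    ring

theorem boom_sum (i j v : Int) (M : List (List Int)) :
    matrix_sum (matrix_boom i j v M) = matrix_sum M
      + (if 0 ≤ i - 1 ∧ i - 1 < (M.length : Int) then pvRowDelta i j v (i-1) (M.getD (i-1).toNat []) else 0)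
      + (if 0 ≤ i ∧ i < (M.length : Int) then pvRowDelta i j v i (M.getD i.toNat []) else 0)
      + (if 0 ≤ i + 1 ∧ i + 1 < (M.length : Int) then pvRowDelta i j v (i+1) (M.getD (i+1).toNat []) else 0) := by
  rw [matrix_sum_eq, matrix_sum_eq]
  unfold matrix_boom
  rw [List.map_map]
  have hpt : ∀ p : Int × List Int,
      ((fun row => row.sum) ∘ fun p : Int × List Int =>
        if p.1 = i ∨ p.1 = i - 1 ∨ p.1 = i + 1 then pvBoomRow i j v p.1 p.2 else p.2) p
      = p.2.sum + ((if p.1 = i - 1 then pvRowDelta i j v (i-1) p.2 else 0)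
                 + ((if p.1 = i then pvRowDelta i j v i p.2 else 0)
                 + (if p.1 = i + 1 then pvRowDelta i j v (i+1) p.2 else 0))) := by
    rintro ⟨r, row⟩
    simp only [Function.comp_apply]
    by_cases hb : r = i ∨ r = i - 1 ∨ r = i + 1
    · rw [if_pos hb, boomRow_sum, indicator_pick i j v row r hb]
      unfold pvRowDelta
      ring
    · rw [if_neg hb, if_neg (show ¬(r = i - 1) by omega), if_neg (show ¬(r = i) by omega),
        if_neg (show ¬(r = i + 1) by omega)]
      ring
  rw [List.map_congr_left (fun p _ => hpt p)]
  rw [sum_map_add, sum_map_add, sum_map_add]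
  rw [show ((PySem.List.enumerate M).map (fun p => p.2.sum)).sum = (M.map (fun row => row.sum)).sum from by
    rw [show ((PySem.List.enumerate M).map fun p => p.2.sum) = ((PySem.List.enumerate M).map Prod.snd).map (fun row => row.sum) from by
      rw [List.map_map]; rfl, PySem.List.map_snd_enumerate]]
  rw [sum_enum_single [] (pvRowDelta i j v (i-1)) (i-1) M 0,
      sum_enum_single [] (pvRowDelta i j v i) i M 0,
      sum_enum_single [] (pvRowDelta i j v (i+1)) (i+1) M 0]
  simp only [zero_add, Int.sub_zero]
  ring

-- B's inner loop over one row equals pvRowDelta, given the center-value fact for row i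
theorem cell_inner_eq (M : List (List Int)) (i j v r res : Int)
    (hv : r = i → 0 ≤ j → j < ((M.getD r.toNat []).length : Int) → (M.getD r.toNat []).getD j.toNat 0 = v) :
    ([j - 1, j, j + 1].foldl (fun res c =>
        if (r ≠ i ∨ c ≠ j) ∧ 0 ≤ c ∧ c < ((M.getD r.toNat []).length : Int) then
          res + ((if (M.getD r.toNat []).getD c.toNat 0 - v > 0 then (M.getD r.toNat []).getD c.toNat 0 - v else 0) - (M.getD r.toNat []).getD c.toNat 0)
        else res) res)
      = res + pvRowDelta i j v r (M.getD r.toNat []) := by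
  set row := M.getD r.toNat [] with hrow
  simp only [List.foldl_cons, List.foldl_nil]
  have step : ∀ (P : Prop) [Decidable P] (acc val : Int),
      (if P then acc + val else acc) = acc + (if P then val else 0) := by
    intros P _ acc val; split_ifs <;> ring
  rw [step, step, step]
  have key : ∀ c : Int, (c = j → r = i → 0 ≤ j → j < (row.length : Int) → row.getD j.toNat 0 = v) →
      (if (r ≠ i ∨ c ≠ j) ∧ 0 ≤ c ∧ c < (row.length : Int) then
        ((if row.getD c.toNat 0 - v > 0 then row.getD c.toNat 0 - v else 0) - row.getD c.toNat 0)
      else 0)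
      = (if 0 ≤ c ∧ c < (row.length : Int) then pvDelta i j v r c (row.getD c.toNat 0) else 0) := by
    intro c hc
    unfold pvDelta
    by_cases hcj : c = j
    · subst hcj
      by_cases hri : r = i
      · by_cases hrg : 0 ≤ c ∧ c < (row.length : Int)
        · have hx : row.getD c.toNat 0 = v := hc rfl hri hrg.1 hrg.2
          split_ifs <;> omega
        · split_ifs <;> omega
      · split_ifs <;> omega
    · split_ifs <;> omega
  rw [key (j - 1) (fun h => absurd h (by omega)),
      key j (fun _ h1 h2 h3 => hv h1 h2 h3),
      key (j + 1) (fun h => absurd h (by omega))]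
  unfold pvRowDelta
  ring

-- the per-cell equality: A's boom-and-sum equals B's adjusted total
theorem cell_eq (M : List (List Int)) (i j v : Int)
    (hv : 0 ≤ i → i < (M.length : Int) → 0 ≤ j → j < ((M.getD i.toNat []).length : Int) → (M.getD i.toNat []).getD j.toNat 0 = v) :
    matrix_sum (matrix_boom i j v M) = pvCellRes M ((M.map (fun row => row.sum)).sum) i j v := by
  rw [boom_sum]
  unfold pvCellRes
  have hg : ∀ (res r : Int), r ∈ [i - 1, i, i + 1] →
      (if 0 ≤ r ∧ r < (M.length : Int) then
        [j - 1, j, j + 1].foldl (fun res c =>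
          if (r ≠ i ∨ c ≠ j) ∧ 0 ≤ c ∧ c < ((M.getD r.toNat []).length : Int) then
            res + ((if (M.getD r.toNat []).getD c.toNat 0 - v > 0 then (M.getD r.toNat []).getD c.toNat 0 - v else 0)
                   - (M.getD r.toNat []).getD c.toNat 0)
          else res) res
      else res)
      = res + (if 0 ≤ r ∧ r < (M.length : Int) then pvRowDelta i j v r (M.getD r.toNat []) else 0) := by
    intro res r _
    by_cases hr : 0 ≤ r ∧ r < (M.length : Int)
    · rw [if_pos hr, if_pos hr, cell_inner_eq M i j v r res]
      intro h1 h2 h3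
      subst h1
      exact hv hr.1 hr.2 h2 h3
    · rw [if_neg hr, if_neg hr]
      ring
  have hrw := PySem.List.foldl_congr_mem (l := [i - 1, i, i + 1])
    (f := fun res r =>
      if 0 ≤ r ∧ r < (M.length : Int) then
        [j - 1, j, j + 1].foldl (fun res c =>
          if (r ≠ i ∨ c ≠ j) ∧ 0 ≤ c ∧ c < ((M.getD r.toNat []).length : Int) then
            res + ((if (M.getD r.toNat []).getD c.toNat 0 - v > 0 then (M.getD r.toNat []).getD c.toNat 0 - v else 0)
                   - (M.getD r.toNat []).getD c.toNat 0)
          else res) res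
      else res)
    (g := fun res r => res + (if 0 ≤ r ∧ r < (M.length : Int) then pvRowDelta i j v r (M.getD r.toNat []) else 0))
    (init := (M.map (fun row => row.sum)).sum) hg
  rw [hrw]
  simp only [List.foldl_cons, List.foldl_nil]
  rw [matrix_sum_eq]

-- ===== VERDICT (by name: the statement is the Claim_ definition above) =====
theorem matr_boom_plan_spec : Claim_equal_matr_boom_plan := by
  intro M _
  unfold Spec_matr_boom_plan matr_boom_plan matr_boom_plan_alt
  congr 1
  apply PySem.List.foldl_congr_mem
  intro dic p hp
  apply PySem.List.foldl_congr_mem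
  intro dic q hq
  congr 1
  rcases (PySem.List.mem_enumerate_iff _ _ _).1 hp with ⟨ri, hri, rfl⟩
  rcases (PySem.List.mem_enumerate_iff _ _ _).1 hq with ⟨cj, hcj, rfl⟩
  simp only [zero_add]
  apply cell_eq
  intro _ _ _ _
  have h1 : M.getD ((ri : Int)).toNat [] = M[ri] := by
    simp [List.getD_eq_getElem?_getD, hri]
  have h2 : (M[ri]).getD ((cj : Int)).toNat 0 = M[ri][cj] := by
    simp [List.getD_eq_getElem?_getD, hcj]
  rw [h1, h2]
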